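-- pv_equiv track=rewrite | github.com/JakobSpahn/time_series_pipeline | pipeline/outlier.py | group_outliers
-- ===== SOURCE A (Python) =====
-- def group_outliers(out):
--     cons = []
--     comp = out[0]
--     curr = []
--     for i in range(len(out)):
--         if(out[i] >= comp and out[i] <= comp+4):
--             curr.append(out[i])
--             comp = out[i]+1
--         else:
--             cons.append(curr)
--             curr = [out[i]]
--             comp = out[i]+1
--
--     if(curr):
--         cons.append(curr)
--
--     return cons
-- ===== SOURCE B (Python) =====
-- def group_outliers(out):
--     # Two-pass: first compute group boundary indices, then slice the list.
--     prev = out[0]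
--     bounds = [0]
--     for i in range(1, len(out)):
--         if not (prev + 1 <= out[i] <= prev + 5):
--             bounds.append(i)
--         prev = out[i]
--     bounds.append(len(out))
--     return [out[b:e] for b, e in zip(bounds, bounds[1:])]
-- ===== Notes on version B (the rewrite author's own statement) =====
-- stated objective: alternative
-- what changed: Replaces A's single open/close accumulator loop (running group list + comp threshold) by a two-pass index-then-partition strategy: one pass collects break indices into bounds, a second pass slices the input list at consecutive bounds.
-- outside the precondition, e.g. on group_outliers([]): A raises IndexError, B raises IndexError
import Mathlib
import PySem

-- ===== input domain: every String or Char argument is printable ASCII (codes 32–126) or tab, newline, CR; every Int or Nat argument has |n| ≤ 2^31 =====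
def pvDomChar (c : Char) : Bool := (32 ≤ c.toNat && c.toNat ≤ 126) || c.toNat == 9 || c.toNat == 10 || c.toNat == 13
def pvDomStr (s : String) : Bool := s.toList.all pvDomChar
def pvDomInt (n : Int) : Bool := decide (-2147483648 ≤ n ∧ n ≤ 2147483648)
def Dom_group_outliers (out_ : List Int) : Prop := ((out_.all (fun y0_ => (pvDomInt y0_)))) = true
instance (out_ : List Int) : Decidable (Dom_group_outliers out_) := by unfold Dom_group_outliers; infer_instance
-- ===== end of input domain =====

-- B groups nearby outlier indices by a two-pass strategy (collect break indices, then slice)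
-- instead of A's single accumulator loop; same cost, different decomposition.


-- ===== PORT A =====
-- one loop iteration of A: x = out[i]; open/extend the current group against comp
def stepA (out_ : List Int) (s : List (List Int) × Int × List Int) (i : Int) :
    List (List Int) × Int × List Int :=
  let x := PySem.List.pyGetD out_ i 0
  if s.2.1 ≤ x ∧ x ≤ s.2.1 + 4 then (s.1, x + 1, s.2.2 ++ [x])
  else (s.1 ++ [s.2.2], x + 1, [x])

def group_outliers (out_ : List Int) : List (List Int) :=
  -- comp starts at the first element (Pre_ guarantees out_ is nonempty, so the default is never read)
  let st := (PySem.List.pyRange 0 (PySem.List.len out_) 1).foldl (stepA out_)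
    ([], PySem.List.pyGetD out_ 0 0, [])
  if st.2.2 ≠ [] then st.1 ++ [st.2.2] else st.1

-- ===== PORT B =====
-- one iteration of B's first pass: record index i as a break if the pairwise test fails
def stepB (out_ : List Int) (s : List Int × Int) (i : Int) : List Int × Int :=
  let x := PySem.List.pyGetD out_ i 0
  (if ¬ (s.2 + 1 ≤ x ∧ x ≤ s.2 + 5) then s.1 ++ [i] else s.1, x)

def group_outliers_alt (out_ : List Int) : List (List Int) :=
  -- prev starts at the first element (Pre_ guarantees out_ is nonempty)
  let st := (PySem.List.pyRange 1 (PySem.List.len out_) 1).foldl (stepB out_)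
    ([0], PySem.List.pyGetD out_ 0 0)
  let bounds := st.1 ++ [PySem.List.len out_]
  (bounds.zip bounds.tail).map (fun be => PySem.List.slice out_ (some be.1) (some be.2))

-- ===== PRECONDITION & SPEC =====
-- A reads the first element before the loop, so it raises IndexError exactly on the empty list.
def Pre_group_outliers (out_ : List Int) : Prop := out_ ≠ []
instance (out_ : List Int) : Decidable (Pre_group_outliers out_) := by
  unfold Pre_group_outliers; infer_instance

def pvWitness_group_outliers : List Int := ([1, 2, 9])

def Spec_group_outliers (out_ : List Int) (out : List (List Int)) : Prop :=
  out = group_outliers_alt out_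
instance (out_ : List Int) (out : List (List Int)) : Decidable (Spec_group_outliers out_ out) := by
  unfold Spec_group_outliers; infer_instance

-- ===== CLAIM (what is proved, stated in full; the proofs are below) =====
def Claim_equal_group_outliers : Prop := ∀ (out_ : List Int), Dom_group_outliers out_ →
  Pre_group_outliers out_ → Spec_group_outliers out_ (group_outliers out_)

-- ===== LEMMAS AND PROOFS =====

-- slices of consecutive pairs of a bound list
def pairSlices (out_ : List Int) : List Int → List (List Int)
  | [] => []
  | [_] => []
  | b :: b' :: r => PySem.List.slice out_ (some b) (some b') :: pairSlices out_ (b' :: r)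

theorem zip_map_eq_pairSlices (out_ : List Int) (bs : List Int) :
    ((bs.zip bs.tail).map (fun be => PySem.List.slice out_ (some be.1) (some be.2)))
      = pairSlices out_ bs := by
  match bs with
  | [] => rfl
  | [b] => rfl
  | b :: b' :: r =>
    have ih := zip_map_eq_pairSlices out_ (b' :: r)
    simp only [List.tail, List.zip_cons_cons, List.map, pairSlices] at ih ⊢
    rw [ih]

theorem pairSlices_append (out_ : List Int) (bs : List Int) (L e : Int) :
    pairSlices out_ (bs ++ [L] ++ [e])
      = pairSlices out_ (bs ++ [L]) ++ [PySem.List.slice out_ (some L) (some e)] := by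
  match bs with
  | [] => rfl
  | [b] => rfl
  | b :: b' :: r =>
    simp only [List.cons_append, pairSlices]
    have := pairSlices_append out_ (b' :: r) L e
    simp only [List.cons_append] at this
    rw [this]

-- extend a slice one element to the right
theorem slice_succ (xs : List Int) (a : Int) (k : Nat) (ha : 0 ≤ a) (hak : a ≤ (k : Int))
    (hk : k < xs.length) :
    PySem.List.slice xs (some a) (some ((k : Int) + 1))
      = PySem.List.slice xs (some a) (some (k : Int)) ++ [xs.getD k 0] := by
  rw [PySem.List.slice_toNat xs ha (by omega), PySem.List.slice_toNat xs ha (by omega)]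
  have h1 : ((k : Int) + 1).toNat = k + 1 := by omega
  have h2 : ((k : Int)).toNat = k := by omega
  rw [h1, h2]
  have hle : a.toNat ≤ k := by omega
  have h3 : k + 1 - a.toNat = (k - a.toNat) + 1 := by omega
  rw [h3, List.take_add_one]
  have h4 : (xs.drop a.toNat)[k - a.toNat]? = xs[k]? := by
    rw [List.getElem?_drop]
    congr 1
    omega
  rw [h4]
  have h5 : xs[k]? = some xs[k] := List.getElem?_eq_getElem hk
  rw [h5]
  simp [List.getD, h5]

theorem slice_nonempty (xs : List Int) (a : Int) (k : Nat) (ha : 0 ≤ a) (hak : a < (k : Int))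
    (hk : k ≤ xs.length) :
    PySem.List.slice xs (some a) (some (k : Int)) ≠ [] := by
  rw [PySem.List.slice_toNat xs ha (by omega)]
  have h2 : ((k : Int)).toNat = k := by omega
  rw [h2]
  intro hcontra
  have hlen := congrArg List.length hcontra
  simp [List.length_take, List.length_drop] at hlen
  omega

-- the joint loop invariant: after processing indices [0,k) (A) resp. [1,k) (B),
-- B's bounds split as bs ++ [L] and A's state is the corresponding slices
theorem loop_invariant (xs : List Int) (k : Nat) (h1 : 1 ≤ k) (hk : k ≤ xs.length) :
    ∃ (bs : List Int) (L : Int), 0 ≤ L ∧ L < (k : Int) ∧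
      (PySem.List.pyRange 1 (k : Int) 1).foldl (stepB xs) ([0], PySem.List.pyGetD xs 0 0)
        = (bs ++ [L], PySem.List.pyGetD xs ((k : Int) - 1) 0) ∧
      (PySem.List.pyRange 0 (k : Int) 1).foldl (stepA xs) ([], PySem.List.pyGetD xs 0 0, [])
        = (pairSlices xs (bs ++ [L]), PySem.List.pyGetD xs ((k : Int) - 1) 0 + 1,
           PySem.List.slice xs (some L) (some (k : Int))) := by
  induction k with
  | zero => omega
  | succ k ih =>
    by_cases hk1 : k = 0
    · -- base case k+1 = 1
      subst hk1
      refine ⟨[], 0, le_refl 0, by norm_num, ?_, ?_⟩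
      · rw [show ((0 + 1 : Nat) : Int) = 1 by norm_num, PySem.List.pyRange_one_eq_nil (by norm_num)]
        simp
      · rw [show ((0 + 1 : Nat) : Int) = 1 by norm_num,
            PySem.List.pyRange_one_cons (by norm_num : (0:Int) < 1),
            show (0:Int) + 1 = 1 by norm_num,
            PySem.List.pyRange_one_eq_nil (by norm_num : (1:Int) ≤ 1)]
        simp only [List.foldl_cons, List.foldl_nil, stepA]
        have hx : (PySem.List.pyGetD xs 0 0 ≤ PySem.List.pyGetD xs 0 0 ∧
            PySem.List.pyGetD xs 0 0 ≤ PySem.List.pyGetD xs 0 0 + 4) := ⟨le_refl _, by omega⟩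
        rw [if_pos hx]
        simp only [pairSlices, List.nil_append]
        refine Prod.ext rfl (Prod.ext (by norm_num) ?_)
        rw [PySem.List.slice_toNat xs (le_refl 0) (by norm_num)]
        cases xs with
        | nil => simp at hk
        | cons y ys => simp [PySem.List.pyGetD_zero_cons]
    · -- step case: k ≥ 1, k + 1 ≤ n
      have hk1' : 1 ≤ k := by omega
      have hkn : k < xs.length := by omega
      obtain ⟨bs, L, hL0, hLk, hB, hA⟩ := ih hk1' (by omega)
      have hcast : ((k + 1 : Nat) : Int) = (k : Int) + 1 := by push_cast; ring
      rw [hcast, PySem.List.pyRange_one_succ_right (by exact_mod_cast hk1'),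
          PySem.List.pyRange_one_succ_right (by positivity), List.foldl_append, List.foldl_append,
          hB, hA, List.foldl_cons, List.foldl_nil, List.foldl_cons, List.foldl_nil]
      set prev := PySem.List.pyGetD xs ((k : Int) - 1) 0 with hprev
      set x := PySem.List.pyGetD xs (k : Int) 0 with hx
      have hxk : ((k : Int) + 1) - 1 = (k : Int) := by ring
      by_cases hc : prev + 1 ≤ x ∧ x ≤ prev + 5
      · -- same group continues
        refine ⟨bs, L, hL0, by omega, ?_, ?_⟩
        · simp only [stepB, hxk, ← hx]
          rw [if_neg (by tauto)]
        · simp only [stepA, ← hx]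
          rw [if_pos (by omega)]
          refine Prod.ext rfl (Prod.ext ?_ ?_)
          · simp [hxk, hx, List.getD_eq_getElem?_getD]
          · have hgd : x = xs.getD k 0 := by
              simp [hx, PySem.List.pyGetD_natCast, List.getD]
            rw [slice_succ xs L k hL0 (by omega) hkn, ← hgd]
      · -- new group starts at index k
        refine ⟨bs ++ [L], (k : Int), by positivity, by omega, ?_, ?_⟩
        · simp only [stepB, hxk, ← hx, if_pos (by tauto)]
        · simp only [stepA, ← hx]
          rw [if_neg (by omega)]
          refine Prod.ext ?_ (Prod.ext ?_ ?_)
          · exact (pairSlices_append xs bs L (k : Int)).symm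
          · simp [hxk, hx, List.getD_eq_getElem?_getD]
          · have hgd : x = xs.getD k 0 := by
              simp [hx, PySem.List.pyGetD_natCast, List.getD]
            have := slice_succ xs (k : Int) k (by positivity) (le_refl _) hkn
            rw [this, ← hgd]
            have hempty : PySem.List.slice xs (some (k : Int)) (some (k : Int)) = [] := by
              rw [PySem.List.slice_toNat xs (by positivity) (by positivity)]
              simp
            rw [hempty, List.nil_append]

-- ===== VERDICT (by name: the statement is the Claim_ definition above) =====
theorem group_outliers_spec : Claim_equal_group_outliers := by
  intro xs _ hpre
  show group_outliers xs = group_outliers_alt xs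
  have hn : 1 ≤ xs.length := by
    cases xs with
    | nil => exact absurd rfl hpre
    | cons y ys => simp
  obtain ⟨bs, L, hL0, hLn, hB, hA⟩ := loop_invariant xs xs.length hn (le_refl _)
  unfold group_outliers group_outliers_alt
  rw [PySem.List.len_eq, hB, hA]
  simp only
  rw [if_pos (slice_nonempty xs L xs.length hL0 hLn (le_refl _))]
  rw [zip_map_eq_pairSlices]
  exact (pairSlices_append xs bs L (xs.length : Int)).symm
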